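-- pv_equiv track=rewrite | github.com/ARNE-08/Handwriting-Recognition-AI | app.py | sort_predictions_by_yx
-- ===== SOURCE A (Python) =====
-- def sort_predictions_by_yx(predictions, y_threshold=20):
--     """
--     Sort predictions by y (vertical) and x (horizontal) coordinates.
--     """
--     # Sort primarily by y, secondarily by x
--     predictions.sort(key=lambda pred: (pred['y'], pred['x']))
--
--     # Group predictions into rows based on y_threshold
--     rows = []
--     current_row = []
--
--     for prediction in predictions:
--         if not current_row or abs(prediction['y'] - current_row[-1]['y']) <= y_threshold:
--             current_row.append(prediction)
--         else:
--             rows.append(current_row)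
--             current_row = [prediction]
--     if current_row:
--         rows.append(current_row)
--
--     # Sort each row by x
--     for row in rows:
--         row.sort(key=lambda pred: pred['x'])
--
--     # Flatten the sorted rows into a single list
--     return [pred for row in rows for pred in row]
-- ===== SOURCE B (Python) =====
-- def sort_predictions_by_yx(predictions, y_threshold=20):
--     """
--     Sort predictions by y (vertical) and x (horizontal) coordinates.
--     """
--     # Sort primarily by y, secondarily by x (in place, as before)
--     predictions.sort(key=lambda pred: (pred['y'], pred['x']))
--
--     # Single pass: build the output directly by online insertion.  out is the
--     # finished prefix (earlier rows) followed by the current row kept ordered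
--     # by x; row_start marks where the current row begins.  Each prediction is
--     # inserted into the current-row region at its x-position (after equals),
--     # found by scanning backwards from the end.  No row lists, no second sort.
--     out = []
--     row_start = 0
--     last_y = None
--     for pred in predictions:
--         if last_y is not None and abs(pred['y'] - last_y) > y_threshold:
--             row_start = len(out)  # close the current row
--         i = len(out)
--         while i > row_start and out[i - 1]['x'] > pred['x']:
--             i -= 1
--         out.insert(i, pred)
--         last_y = pred['y']
--     return out
-- ===== Notes on version B (the rewrite author's own statement) =====
-- stated objective: alternative
-- what changed: Instead of collecting explicit row lists, sorting each row with a second sort call and flattening, B builds the output in one pass by online insertion: it keeps the current row's region of the output ordered by x and inserts each prediction there via a backward scan (insertion sort per row), with no row lists and no second sort.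
import Mathlib
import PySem

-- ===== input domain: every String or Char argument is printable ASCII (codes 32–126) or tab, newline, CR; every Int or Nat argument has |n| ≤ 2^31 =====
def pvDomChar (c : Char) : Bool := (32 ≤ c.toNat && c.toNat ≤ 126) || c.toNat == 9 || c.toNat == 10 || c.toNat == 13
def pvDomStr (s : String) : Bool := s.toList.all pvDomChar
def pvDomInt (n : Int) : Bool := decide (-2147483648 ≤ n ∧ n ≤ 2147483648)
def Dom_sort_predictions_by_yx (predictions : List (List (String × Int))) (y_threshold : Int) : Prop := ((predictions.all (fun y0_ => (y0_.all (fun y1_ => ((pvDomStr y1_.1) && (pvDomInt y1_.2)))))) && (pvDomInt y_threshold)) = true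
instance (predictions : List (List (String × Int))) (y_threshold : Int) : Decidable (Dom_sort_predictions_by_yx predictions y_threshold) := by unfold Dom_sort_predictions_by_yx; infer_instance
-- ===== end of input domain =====

-- B replaces A's three stages (group into row lists, second sort per row, flatten) by one
-- pass that builds the output directly via per-row online insertion (backward scan);
-- equivalence is about the RETURN value (both Pythons also sort the argument in place by
-- (y, x), identically).

-- shared key accessors: pred['y'] and pred['x'] (Pre_ guarantees the keys exist; getD's
-- default is never reached inside Pre_)
def pvY (p : List (String × Int)) : Int := PySem.Dict.getD (PySem.Dict.mk p) "y" 0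
def pvX (p : List (String × Int)) : Int := PySem.Dict.getD (PySem.Dict.mk p) "x" 0

-- ===== PORT A =====
-- loop body of A's grouping loop ('for prediction in predictions: …')
def pvStepA (t : Int) (acc : List (List (List (String × Int))) × List (List (String × Int)))
    (p : List (String × Int)) : List (List (List (String × Int))) × List (List (String × Int)) :=
  match acc.2.getLast? with            -- 'not current_row or …' short-circuit; current_row[-1]
  | none => (acc.1, acc.2 ++ [p])
  | some last => if |pvY p - pvY last| ≤ t then (acc.1, acc.2 ++ [p]) else (acc.1 ++ [acc.2], [p])

def sort_predictions_by_yx (predictions : List (List (String × Int))) (y_threshold : Int) : List (List (String × Int)) :=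
  let s := PySem.List.sorted2 predictions pvY pvX
  let st := s.foldl (pvStepA y_threshold) ([], [])
  let rows := if st.2 ≠ [] then st.1 ++ [st.2] else st.1
  let rows2 := rows.map (fun row => PySem.List.sorted row pvX)
  rows2.flatten

-- ===== PORT B =====
-- B's 'while i > row_start and out[i-1]["x"] > pred["x"]: i -= 1', as a recursion on i
def pvScan (out : List (List (String × Int))) (rs : Nat) (xp : Int) : Nat → Nat
  | 0 => 0
  | i + 1 => if rs ≤ i ∧ xp < pvX (out.getD i []) then pvScan out rs xp i else i + 1

-- loop body of B's single pass (state: out, row_start, last_y)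
def pvStepB (t : Int) (st : List (List (String × Int)) × Nat × Option Int)
    (p : List (String × Int)) : List (List (String × Int)) × Nat × Option Int :=
  let rs := match st.2.2 with
    | some ly => if t < |pvY p - ly| then st.1.length else st.2.1
    | none => st.2.1
  let i := pvScan st.1 rs (pvX p) st.1.length
  (st.1.insertIdx i p, rs, some (pvY p))

def sort_predictions_by_yx_alt (predictions : List (List (String × Int))) (y_threshold : Int) : List (List (String × Int)) :=
  let s := PySem.List.sorted2 predictions pvY pvX
  (s.foldl (pvStepB y_threshold) ([], 0, none)).1

-- ===== PRECONDITION & SPEC =====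
-- Pre_ excludes exactly the inputs where A raises KeyError: a prediction missing key "y" or "x".
def Pre_sort_predictions_by_yx (predictions : List (List (String × Int))) (y_threshold : Int) : Prop :=
  predictions.all (fun p => (PySem.Dict.get? (PySem.Dict.mk p) "y").isSome && (PySem.Dict.get? (PySem.Dict.mk p) "x").isSome) = true
instance (predictions : List (List (String × Int))) (y_threshold : Int) : Decidable (Pre_sort_predictions_by_yx predictions y_threshold) := by unfold Pre_sort_predictions_by_yx; infer_instance
def pvWitness_sort_predictions_by_yx : (List (List (String × Int))) × Int :=
  ([[("y", 3), ("x", 1)], [("y", 30), ("x", 0)]], 20)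

def Spec_sort_predictions_by_yx (predictions : List (List (String × Int))) (y_threshold : Int) (out : List (List (String × Int))) : Prop := out = sort_predictions_by_yx_alt predictions y_threshold
instance (predictions : List (List (String × Int))) (y_threshold : Int) (out : List (List (String × Int))) : Decidable (Spec_sort_predictions_by_yx predictions y_threshold out) := by unfold Spec_sort_predictions_by_yx; infer_instance

-- ===== CLAIM (what is proved, stated in full; the proofs are below) =====
def Claim_equal_sort_predictions_by_yx : Prop := ∀ (predictions : List (List (String × Int))) (y_threshold : Int), Dom_sort_predictions_by_yx predictions y_threshold → Pre_sort_predictions_by_yx predictions y_threshold → Spec_sort_predictions_by_yx predictions y_threshold (sort_predictions_by_yx predictions y_threshold)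

-- ===== LEMMAS AND PROOFS =====

-- A's grouping, as a recursion on the remaining list (cur is the current row, ly = pvY of its last element)
def pvGrp (t : Int) : List (List (String × Int)) → List (List (String × Int)) → Int → List (List (List (String × Int)))
  | [], cur, _ => [cur]
  | p :: s, cur, ly => if |pvY p - ly| ≤ t then pvGrp t s (cur ++ [p]) (pvY p) else cur :: pvGrp t s [p] (pvY p)

theorem pvA_loop (t : Int) (s : List (List (String × Int))) :
    ∀ (rows : List (List (List (String × Int)))) (cur : List (List (String × Int)))
      (lst : List (String × Int)), cur.getLast? = some lst →
    (s.foldl (pvStepA t) (rows, cur)).2 ≠ [] ∧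
    (s.foldl (pvStepA t) (rows, cur)).1 ++ [(s.foldl (pvStepA t) (rows, cur)).2]
      = rows ++ pvGrp t s cur (pvY lst) := by
  induction s with
  | nil =>
      intro rows cur lst h
      refine ⟨?_, rfl⟩
      intro hc
      simp only [List.foldl_nil] at hc
      rw [hc] at h; simp at h
  | cons p s ih =>
      intro rows cur lst h
      simp only [List.foldl_cons, pvStepA, h, pvGrp]
      by_cases hc : |pvY p - pvY lst| ≤ t
      · rw [if_pos hc, if_pos hc]
        exact ih rows (cur ++ [p]) p (by simp)
      · rw [if_neg hc, if_neg hc]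
        obtain ⟨h1, h2⟩ := ih (rows ++ [cur]) [p] p (by simp)
        exact ⟨h1, by rw [h2]; simp⟩

-- insertBy skips a prefix it does not go before
theorem pvInsertBy_append {α : Type} (before : α → α → Bool) (x : α) (a b : List α)
    (h : ∀ y ∈ a, before x y = false) :
    PySem.List.insertBy before x (a ++ b) = a ++ PySem.List.insertBy before x b := by
  induction a with
  | nil => rfl
  | cons y a ih =>
      simp only [List.cons_append, PySem.List.insertBy, h y (by simp)]
      simp only [Bool.false_eq_true, if_false, List.cons.injEq, true_and]
      exact ih (fun z hz => h z (by simp [hz]))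

-- insertBy commutes with a final element it does go before
theorem pvInsertBy_concat_of_before {α : Type} (before : α → α → Bool) (x q : α)
    (hq : before x q = true) :
    ∀ (l : List α), PySem.List.insertBy before x (l ++ [q]) = PySem.List.insertBy before x l ++ [q] := by
  intro l
  induction l with
  | nil => simp [PySem.List.insertBy, hq]
  | cons y l ih =>
      simp only [List.cons_append, PySem.List.insertBy]
      by_cases hy : before x y
      · simp [hy]
      · simp [hy, ih]

-- insertBy appends when it goes before nothing
theorem pvInsertBy_last {α : Type} (before : α → α → Bool) (x : α) (l : List α)
    (h : ∀ y ∈ l, before x y = false) :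
    PySem.List.insertBy before x l = l ++ [x] := by
  have := pvInsertBy_append before x l [] h
  simpa using this

-- the backward scan never leaves [0, i]
theorem pvScan_le (out : List (List (String × Int))) (rs : Nat) (xp : Int) :
    ∀ i, pvScan out rs xp i ≤ i := by
  intro i
  induction i with
  | zero => simp [pvScan]
  | succ i ih =>
      simp only [pvScan]
      split
      · omega
      · omega

-- the scan stops immediately when it starts at the row boundary
theorem pvScan_rs (out : List (List (String × Int))) (rs : Nat) (xp : Int) :
    pvScan out rs xp rs = rs := by
  cases rs with
  | zero => rfl
  | succ i => simp only [pvScan]; rw [if_neg (by omega)]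

-- the scan only reads indices below i, so a final element is invisible
theorem pvScan_concat (l : List (List (String × Int))) (q : List (String × Int))
    (rs : Nat) (xp : Int) :
    ∀ i, i ≤ l.length → pvScan (l ++ [q]) rs xp i = pvScan l rs xp i := by
  intro i
  induction i with
  | zero => intro _; rfl
  | succ i ih =>
      intro hi
      have hgd : (l ++ [q]).getD i [] = l.getD i [] := by
        unfold List.getD
        rw [List.getElem?_append_left (by omega)]
      simp only [pvScan, hgd]
      split
      · exact ih (by omega)
      · rfl

theorem pvGetD_concat (l : List (List (String × Int))) (q : List (String × Int)) :
    (l ++ [q]).getD l.length [] = q := by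
  unfold List.getD
  rw [List.getElem?_append_right (by omega)]
  simp

theorem pvInsertIdx_concat {α : Type} (l : List α) (q x : α) :
    ∀ i, i ≤ l.length → (l ++ [q]).insertIdx i x = l.insertIdx i x ++ [q] := by
  induction l with
  | nil =>
      intro i hi
      have h0 : i = 0 := Nat.le_zero.mp hi
      subst h0; rfl
  | cons y l ih =>
      intro i hi
      cases i with
      | zero => rfl
      | succ i =>
          simp only [List.cons_append, List.insertIdx_succ_cons]
          simp [ih i (by simpa using hi)]

-- the backward scan plus insert equals Python's stable insertion into the sorted row
theorem pvScan_insert (p : List (String × Int)) :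
    ∀ (b : List (List (String × Int))), b.Pairwise (fun u v => pvX u ≤ pvX v) →
    ∀ (a : List (List (String × Int))),
    (a ++ b).insertIdx (pvScan (a ++ b) a.length (pvX p) (a ++ b).length) p
      = a ++ PySem.List.insertBy (fun u v => decide (pvX u < pvX v)) p b := by
  intro b
  induction b using List.reverseRecOn with
  | nil =>
      intro _ a
      simp only [List.append_nil, pvScan_rs, List.insertIdx_length_self, PySem.List.insertBy]
  | append_singleton b' q ih =>
      intro hpw a
      rw [List.pairwise_append] at hpw
      obtain ⟨hb', _, hlast⟩ := hpw
      have hassoc : a ++ (b' ++ [q]) = (a ++ b') ++ [q] := by simp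
      rw [hassoc]
      have hlen : ((a ++ b') ++ [q]).length = (a ++ b').length + 1 := by
        rw [List.length_append]
        rfl
      rw [hlen]
      simp only [pvScan]
      by_cases hc : pvX p < pvX q
      · rw [if_pos ⟨by simp, by rw [pvGetD_concat]; exact hc⟩]
        rw [pvScan_concat _ _ _ _ _ (le_refl _)]
        rw [pvInsertIdx_concat _ _ _ _ (le_trans (pvScan_le _ _ _ _) (le_refl _))]
        rw [ih hb' a]
        rw [pvInsertBy_concat_of_before _ _ _ (by simpa using hc)]
        simp
      · rw [if_neg (by rw [pvGetD_concat]; tauto)]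
        have hmv : (a ++ b') ++ [q] ++ [p] = a ++ ((b' ++ [q]) ++ [p]) := by simp
        rw [show (a ++ b').length + 1 = ((a ++ b') ++ [q]).length from hlen.symm,
            List.insertIdx_length_self, hmv]
        congr 1
        rw [pvInsertBy_last _ p (b' ++ [q])
          (by
            intro y hy
            rcases List.mem_append.mp hy with hy | hy
            · have := hlast y hy q (by simp)
              simp only [decide_eq_false_iff_not, not_lt]
              omega
            · simp only [List.mem_singleton] at hy
              subst hy
              simp only [decide_eq_false_iff_not, not_lt]
              omega)]

-- the invariant of B's single pass: out = finished rows (each sorted by x) ++ sorted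
-- current row, row_start = length of the finished part, last_y = y of the last raw element
theorem pvB_loop (t : Int) (s : List (List (String × Int))) :
    ∀ (done cur : List (List (String × Int))) (lst : List (String × Int)),
      cur.getLast? = some lst →
    (s.foldl (pvStepB t) (done ++ PySem.List.sorted cur pvX, done.length, some (pvY lst))).1
      = done ++ ((pvGrp t s cur (pvY lst)).map (fun g => PySem.List.sorted g pvX)).flatten := by
  induction s with
  | nil => intro done cur lst _; simp [pvGrp]
  | cons p s ih =>
      intro done cur lst h
      simp only [List.foldl_cons, pvStepB, pvGrp]
      by_cases hc : |pvY p - pvY lst| ≤ t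
      · rw [if_pos hc, if_neg (by omega : ¬ t < |pvY p - pvY lst|)]
        have hins := pvScan_insert p (PySem.List.sorted cur pvX)
          (PySem.List.sorted_pairwise cur pvX) done
        have hsorted : PySem.List.insertBy (fun u v => decide (pvX u < pvX v)) p
            (PySem.List.sorted cur pvX) = PySem.List.sorted (cur ++ [p]) pvX := by
          rw [PySem.List.sorted_eq_foldl_insertBy, PySem.List.sorted_eq_foldl_insertBy,
            List.foldl_append]
          rfl
        rw [hins, hsorted]
        exact ih done (cur ++ [p]) p (by simp)
      · rw [if_neg hc, if_pos (by omega : t < |pvY p - pvY lst|)]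
        rw [pvScan_rs, List.insertIdx_length_self]
        have h1 : done ++ PySem.List.sorted cur pvX ++ [p]
            = (done ++ PySem.List.sorted cur pvX) ++ PySem.List.sorted [p] pvX := by simp [PySem.List.sorted, PySem.List.insertBy]
        rw [h1]
        rw [ih (done ++ PySem.List.sorted cur pvX) [p] p rfl]
        simp

-- ===== VERDICT (by name: the statement is the Claim_ definition above) =====
theorem sort_predictions_by_yx_spec : Claim_equal_sort_predictions_by_yx := by
  intro predictions y_threshold _ _
  unfold Spec_sort_predictions_by_yx sort_predictions_by_yx sort_predictions_by_yx_alt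
  cases hs : PySem.List.sorted2 predictions pvY pvX with
  | nil => rfl
  | cons p s =>
      simp only []
      -- A side
      have hA := pvA_loop y_threshold s [] [p] p rfl
      have hstepA : pvStepA y_threshold ([], []) p = ([], [p]) := rfl
      -- B side: the first iteration produces out = [p], row_start = 0, last_y = y(p)
      have hstepB : pvStepB y_threshold ([], 0, none) p = ([p], 0, some (pvY p)) := rfl
      rw [List.foldl_cons, List.foldl_cons, hstepA, hstepB]
      rw [if_pos hA.1, hA.2]
      have hB := pvB_loop y_threshold s [] [p] p rfl
      simp only [List.nil_append, List.length_nil] at hB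
      have hp1 : PySem.List.sorted [p] pvX = [p] := rfl
      rw [hp1] at hB
      rw [hB]
      simp
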